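-- pv_equiv track=rewrite | github.com/J-EUM/coding-test | 프로그래머스/2/84512. 모음 사전/모음 사전.py | solution
-- ===== SOURCE A (Python) =====
-- def solution(word):
--     vowels = ['A', 'E', 'I', 'O', 'U']
--     idx_map = {ch: i for i, ch in enumerate(vowels)}
--     total = 0
--     for i, ch in enumerate(word):
--         ch_index = idx_map[ch]
--         # 뒤에 남은 자릿수에서 만들 수 있는 조합 수
--         for j in range(i, 5):
--             total += ch_index * (5 ** (4 - j))
--         total += 1  # 현재 단어 자체
--     return total
-- ===== SOURCE B (Python) =====
-- def solution(word):
--     idx_map = {ch: i for i, ch in enumerate('AEIOU')}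
--     W = [781, 156, 31, 6, 1]  # closed form of sum(5**(4-j) for j in range(i,5))
--     return sum(idx_map[ch] * (W[i] if i < 5 else 0) for i, ch in enumerate(word)) + len(word)
-- ===== Notes on version B (the rewrite author's own statement) =====
-- stated objective: simpler
-- what changed: Replaces A's nested inner loop over range(i,5) of powers of 5 by a precomputed closed-form weight table W=[781,156,31,6,1] and a single weighted-sum pass, adding len(word) for the per-character +1.
import Mathlib
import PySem

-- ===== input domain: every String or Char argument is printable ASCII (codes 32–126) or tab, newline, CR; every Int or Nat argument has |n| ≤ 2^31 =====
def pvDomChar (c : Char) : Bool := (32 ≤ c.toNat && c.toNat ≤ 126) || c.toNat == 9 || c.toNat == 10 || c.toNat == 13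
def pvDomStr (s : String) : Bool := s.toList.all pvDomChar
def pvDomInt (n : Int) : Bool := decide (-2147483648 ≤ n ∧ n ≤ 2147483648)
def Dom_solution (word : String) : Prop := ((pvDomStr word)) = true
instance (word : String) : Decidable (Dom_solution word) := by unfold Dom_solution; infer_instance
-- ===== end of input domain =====

-- B replaces A's inner loop over range(i,5) of powers of 5 by the precomputed
-- closed-form weight table W = [781,156,31,6,1] and one weighted-sum pass (+ len(word)).


-- ===== PORT A =====
-- idx_map = {ch: i for i, ch in enumerate(vowels)}
def pvIdxMapA : PySem.Dict Char Int :=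
  (PySem.List.enumerate ['A', 'E', 'I', 'O', 'U']).foldl
    (fun d p => d.insert p.2 p.1) PySem.Dict.empty

def solution (word : String) : Int :=
  (PySem.List.enumerate word.toList).foldl
    (fun total p =>
      -- ch_index = idx_map[ch]; KeyError (non-vowel ch) is excluded by Pre_solution
      -- for j in range(i, 5): total += ch_index * (5 ** (4 - j))
      -- (4 - j ≥ 0 for every j in the range, so .toNat is exact for Python's **)
      ((PySem.List.pyRange p.1 5 1).foldl
        (fun t j => t + pvIdxMapA.getD p.2 0 * (5 : Int) ^ (4 - j).toNat) total) + 1)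
    0

-- ===== PORT B =====
-- idx_map = {ch: i for i, ch in enumerate('AEIOU')}
def pvIdxMapB : PySem.Dict Char Int :=
  (PySem.List.enumerate "AEIOU".toList).foldl
    (fun d p => d.insert p.2 p.1) PySem.Dict.empty

def solution_alt (word : String) : Int :=
  -- W = [781, 156, 31, 6, 1]; sum(idx_map[ch] * (W[i] if i < 5 else 0)
  --                               for i, ch in enumerate(word)) + len(word)
  ((PySem.List.enumerate word.toList).foldl
    (fun s p =>
      s + pvIdxMapB.getD p.2 0 *
        (if p.1 < 5 then PySem.List.pyGetD ([781, 156, 31, 6, 1] : List Int) p.1 0 else 0)) 0)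
  + PySem.Str.len word

-- ===== PRECONDITION & SPEC =====
-- Pre_ excludes exactly the words containing a non-vowel character: there
-- A's idx_map[ch] raises KeyError (B raises the same KeyError).
def Pre_solution (word : String) : Prop :=
  (word.toList.all (fun c => c ∈ (['A', 'E', 'I', 'O', 'U'] : List Char))) = true
instance (word : String) : Decidable (Pre_solution word) := by unfold Pre_solution; infer_instance

def pvWitness_solution : String := "EIO"

def Spec_solution (word : String) (out : Int) : Prop := out = solution_alt word
instance (word : String) (out : Int) : Decidable (Spec_solution word out) := by unfold Spec_solution; infer_instance

-- ===== CLAIM (what is proved, stated in full; the proofs are below) =====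
def Claim_equal_solution : Prop :=
  ∀ (word : String), Dom_solution word → Pre_solution word → Spec_solution word (solution word)

-- ===== LEMMAS AND PROOFS =====

-- the two index maps are the same dictionary
theorem pvIdxMaps_eq : pvIdxMapA = pvIdxMapB := by decide

-- B's per-character weight
def pvWeight (i : Int) : Int :=
  if i < 5 then PySem.List.pyGetD ([781, 156, 31, 6, 1] : List Int) i 0 else 0

-- A's inner loop computes c * pvWeight n (plus the accumulator)
theorem pv_inner (c t : Int) (n : Nat) :
    (PySem.List.pyRange (n : Int) 5 1).foldl
      (fun t j => t + c * (5 : Int) ^ (4 - j).toNat) t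
    = t + c * pvWeight (n : Int) := by
  match n with
  | 0 => rw [show PySem.List.pyRange ((0 : Nat) : Int) 5 1 = [0, 1, 2, 3, 4] from by decide]
         norm_num [pvWeight, PySem.List.pyGetD_ofNat',
           show Int.toNat 4 = 4 from by decide, show Int.toNat 3 = 3 from by decide,
           show Int.toNat 2 = 2 from by decide, show Int.toNat 1 = 1 from by decide,
           show Int.toNat 0 = 0 from by decide]
         ring
  | 1 => rw [show PySem.List.pyRange ((1 : Nat) : Int) 5 1 = [1, 2, 3, 4] from by decide]
         norm_num [pvWeight, PySem.List.pyGetD_ofNat',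
           show Int.toNat 4 = 4 from by decide, show Int.toNat 3 = 3 from by decide,
           show Int.toNat 2 = 2 from by decide, show Int.toNat 1 = 1 from by decide,
           show Int.toNat 0 = 0 from by decide]
         ring
  | 2 => rw [show PySem.List.pyRange ((2 : Nat) : Int) 5 1 = [2, 3, 4] from by decide]
         norm_num [pvWeight, PySem.List.pyGetD_ofNat',
           show Int.toNat 4 = 4 from by decide, show Int.toNat 3 = 3 from by decide,
           show Int.toNat 2 = 2 from by decide, show Int.toNat 1 = 1 from by decide,
           show Int.toNat 0 = 0 from by decide]
         ring
  | 3 => rw [show PySem.List.pyRange ((3 : Nat) : Int) 5 1 = [3, 4] from by decide]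
         norm_num [pvWeight, PySem.List.pyGetD_ofNat',
           show Int.toNat 4 = 4 from by decide, show Int.toNat 3 = 3 from by decide,
           show Int.toNat 2 = 2 from by decide, show Int.toNat 1 = 1 from by decide,
           show Int.toNat 0 = 0 from by decide]
         ring
  | 4 => rw [show PySem.List.pyRange ((4 : Nat) : Int) 5 1 = [4] from by decide]
         norm_num [pvWeight, PySem.List.pyGetD_ofNat',
           show Int.toNat 4 = 4 from by decide, show Int.toNat 3 = 3 from by decide,
           show Int.toNat 2 = 2 from by decide, show Int.toNat 1 = 1 from by decide,
           show Int.toNat 0 = 0 from by decide]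
  | (m + 5) =>
         rw [PySem.List.pyRange_one_eq_nil (by push_cast; omega)]
         have hw : pvWeight ((m + 5 : Nat) : Int) = 0 := by
           unfold pvWeight; rw [if_neg (by push_cast; omega)]
         rw [hw]; simp

-- main invariant: A's fold equals the accumulator plus B's weighted sum plus the length
theorem pv_main (l : List Char) (n : Nat) (t : Int) :
    (PySem.List.enumerate l (n : Int)).foldl
      (fun total p =>
        ((PySem.List.pyRange p.1 5 1).foldl
          (fun t j => t + pvIdxMapA.getD p.2 0 * (5 : Int) ^ (4 - j).toNat) total) + 1) t
    = t + ((PySem.List.enumerate l (n : Int)).map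
        (fun p => pvIdxMapA.getD p.2 0 * pvWeight p.1)).sum + l.length := by
  induction l generalizing n t with
  | nil => simp [PySem.List.enumerate_nil]
  | cons c l ih =>
    rw [PySem.List.enumerate_cons]
    simp only [List.foldl_cons, List.map_cons, List.sum_cons]
    rw [pv_inner]
    rw [show ((n : Int) + 1) = ((n + 1 : Nat) : Int) from by push_cast; ring]
    rw [ih]
    simp only [List.length_cons]
    push_cast
    ring

-- B's fold pulled apart into init + sum
theorem pv_foldl_add (l : List (Int × Char)) (a : Int) (g : Int × Char → Int) :
    l.foldl (fun acc x => acc + g x) a = a + (l.map g).sum := by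
  induction l generalizing a with
  | nil => simp
  | cons x l ih => simp [ih]; ring

-- ===== VERDICT (by name: the statement is the Claim_ definition above) =====
theorem solution_spec : Claim_equal_solution := by
  intro word _ _
  show solution word = solution_alt word
  unfold solution solution_alt
  rw [pv_foldl_add (PySem.List.enumerate word.toList) 0
        (fun p => pvIdxMapB.getD p.2 0 *
          (if p.1 < 5 then PySem.List.pyGetD ([781, 156, 31, 6, 1] : List Int) p.1 0 else 0))]
  have h := pv_main word.toList 0 0
  push_cast at h
  rw [h, PySem.Str.len_eq, pvIdxMaps_eq]
  simp [pvWeight]
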